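-- pv_equiv track=rewrite | github.com/mitchpowell1/Advent-Of-Code-2020 | Day9/challenge.py | part_one
-- ===== SOURCE A (Python) =====
-- def part_one(numbers, preamble_size=25):
--     for i in range(preamble_size, len(numbers)):
--         preamble_set = set(numbers[i - preamble_size: i])
--         found = False
--         for number in preamble_set:
--             required = numbers[i] - number
--             if required == number:
--                 continue
--             elif required in preamble_set:
--                 found = True
--                 break
--         if not found:
--             return numbers[i]
-- ===== SOURCE B (Python) =====
-- def part_one(numbers, preamble_size=25):
--     for i in range(preamble_size, len(numbers)):
--         vals = sorted(set(numbers[i - preamble_size: i]))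
--         target = numbers[i]
--         lo, hi = 0, len(vals) - 1
--         found = False
--         while lo < hi:
--             s = vals[lo] + vals[hi]
--             if s == target:
--                 found = True
--                 break
--             elif s < target:
--                 lo += 1
--             else:
--                 hi -= 1
--         if not found:
--             return numbers[i]
-- ===== Notes on version B (the rewrite author's own statement) =====
-- stated objective: alternative
-- what changed: The hash-set complement lookup over the window's distinct values is replaced by sorting the distinct window values and running a two-pointer sweep to find a pair of distinct values summing to the target.
import Mathlib
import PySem

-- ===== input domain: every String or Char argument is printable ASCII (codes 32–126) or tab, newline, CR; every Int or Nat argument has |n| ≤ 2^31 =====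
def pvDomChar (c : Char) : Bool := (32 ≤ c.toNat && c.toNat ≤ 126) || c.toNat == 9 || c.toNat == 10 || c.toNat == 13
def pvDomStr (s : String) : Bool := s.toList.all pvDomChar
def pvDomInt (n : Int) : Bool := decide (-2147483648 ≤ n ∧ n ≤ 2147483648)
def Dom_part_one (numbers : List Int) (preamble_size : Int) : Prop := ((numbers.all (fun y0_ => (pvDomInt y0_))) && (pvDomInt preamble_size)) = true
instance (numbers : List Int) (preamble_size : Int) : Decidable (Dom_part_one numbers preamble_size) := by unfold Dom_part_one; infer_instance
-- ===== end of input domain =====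

-- B replaces A's hash-set complement lookup by sort + two-pointer sweep over the window's distinct values (alternative algorithm, similar cost).

-- ===== PORT A =====
-- numbers[i] ported as pyGetD with default 0: exact under Pre_ (every accessed index is in Python's range)
def pvALoop (numbers : List Int) (preamble_size : Int) : List Int → Option Int
  | [] => none
  | i :: rest =>
      let x := PySem.List.pyGetD numbers i 0
      let pset : PySem.Set Int := PySem.Set.ofList (PySem.List.slice numbers (some (i - preamble_size)) (some i))
      -- inner 'for number in preamble_set' with break: order-independent existence test over the set
      let found := pset.any (fun number => decide (x - number ≠ number) && PySem.Set.contains pset (x - number))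
      if found then pvALoop numbers preamble_size rest else some x

def part_one (numbers : List Int) (preamble_size : Int) : Option Int :=
  pvALoop numbers preamble_size (PySem.List.pyRange preamble_size (numbers.length : Int) 1)

-- ===== PORT B =====
-- vals[lo] / vals[hi] ported as getD 0: exact, lo < hi < vals.length throughout the sweep
def pvTwoPtr (vals : List Int) (target : Int) (lo hi : Nat) : Bool :=
  if lo < hi then
    let s := vals.getD lo 0 + vals.getD hi 0
    if s = target then true
    else if s < target then pvTwoPtr vals target (lo + 1) hi
    else pvTwoPtr vals target lo (hi - 1)
  else false
termination_by hi - lo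

def pvBLoop (numbers : List Int) (preamble_size : Int) : List Int → Option Int
  | [] => none
  | i :: rest =>
      let x := PySem.List.pyGetD numbers i 0
      let vals := PySem.List.sorted (PySem.Set.ofList (PySem.List.slice numbers (some (i - preamble_size)) (some i))) (fun v => v) false
      if pvTwoPtr vals x 0 (vals.length - 1) then pvBLoop numbers preamble_size rest else some x

def part_one_alt (numbers : List Int) (preamble_size : Int) : Option Int :=
  pvBLoop numbers preamble_size (PySem.List.pyRange preamble_size (numbers.length : Int) 1)

-- ===== PRECONDITION & SPEC =====
-- Pre_ excludes exactly the inputs on which A raises: for preamble_size < -len(numbers)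
-- the very first iteration evaluates numbers[preamble_size], an IndexError.
def Pre_part_one (numbers : List Int) (preamble_size : Int) : Prop := -(numbers.length : Int) ≤ preamble_size
instance (numbers : List Int) (preamble_size : Int) : Decidable (Pre_part_one numbers preamble_size) := by unfold Pre_part_one; infer_instance

def pvWitness_part_one : List Int × Int := ([35, 20, 15, 25, 47, 40, 62, 55, 65, 95, 102, 117], 5)

def Spec_part_one (numbers : List Int) (preamble_size : Int) (out : Option Int) : Prop := out = part_one_alt numbers preamble_size
instance (numbers : List Int) (preamble_size : Int) (out : Option Int) : Decidable (Spec_part_one numbers preamble_size out) := by unfold Spec_part_one; infer_instance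

-- ===== CLAIM (what is proved, stated in full; the proofs are below) =====
def Claim_equal_part_one : Prop := ∀ (numbers : List Int) (preamble_size : Int), Dom_part_one numbers preamble_size → Pre_part_one numbers preamble_size → Spec_part_one numbers preamble_size (part_one numbers preamble_size)

-- ===== LEMMAS AND PROOFS =====

-- monotone access in a (·≤·)-pairwise list
theorem pvMono {vals : List Int} (h : vals.Pairwise (· ≤ ·)) {i j : Nat}
    (hij : i ≤ j) (hj : j < vals.length) : vals.getD i 0 ≤ vals.getD j 0 := by
  rcases Nat.lt_or_ge i j with hlt | hge
  · have := (List.pairwise_iff_getElem.mp h) i j (Nat.lt_trans hlt hj) hj hlt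
    simpa [List.getD_eq_getElem, Nat.lt_trans hlt hj, hj] using this
  · have : i = j := le_antisymm hij hge
    subst this; rfl

-- two-pointer sweep finds a pair iff an index pair in [lo, hi] sums to target
theorem pvTwoPtr_iff (vals : List Int) (target : Int) (hs : vals.Pairwise (· ≤ ·)) :
    ∀ lo hi : Nat, hi < vals.length →
      (pvTwoPtr vals target lo hi = true ↔
        ∃ i j : Nat, lo ≤ i ∧ i < j ∧ j ≤ hi ∧ vals.getD i 0 + vals.getD j 0 = target) := by
  have main : ∀ n lo hi : Nat, hi - lo = n → hi < vals.length →
      (pvTwoPtr vals target lo hi = true ↔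
        ∃ i j : Nat, lo ≤ i ∧ i < j ∧ j ≤ hi ∧ vals.getD i 0 + vals.getD j 0 = target) := by
    intro n
    induction n with
    | zero =>
        intro lo hi hn hhi
        rw [pvTwoPtr]
        have hnl : ¬ lo < hi := by omega
        simp only [hnl, if_false]
        constructor
        · intro h; exact absurd h (by simp)
        · rintro ⟨i, j, h1, h2, h3, _⟩; omega
    | succ n ih =>
        intro lo hi hn hhi
        have hlt : lo < hi := by omega
        rw [pvTwoPtr]
        simp only [hlt, if_true]
        by_cases heq : vals.getD lo 0 + vals.getD hi 0 = target
        · simp only [heq, if_true]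
          constructor
          · intro _; exact ⟨lo, hi, le_refl _, hlt, le_refl _, heq⟩
          · intro _; trivial
        · simp only [heq, if_false]
          by_cases hlt2 : vals.getD lo 0 + vals.getD hi 0 < target
          · simp only [hlt2, if_true]
            rw [ih (lo + 1) hi (by omega) hhi]
            constructor
            · rintro ⟨i, j, h1, h2, h3, h4⟩
              exact ⟨i, j, by omega, h2, h3, h4⟩
            · rintro ⟨i, j, h1, h2, h3, h4⟩
              refine ⟨i, j, ?_, h2, h3, h4⟩
              rcases Nat.lt_or_ge lo i with h | h
              · omega
              · -- i = lo; then the pair sum is < target, contradiction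
                have hieq : i = lo := by omega
                subst hieq
                have hjle : vals.getD j 0 ≤ vals.getD hi 0 := pvMono hs h3 hhi
                omega
          · simp only [hlt2, if_false]
            rw [ih lo (hi - 1) (by omega) (by omega)]
            constructor
            · rintro ⟨i, j, h1, h2, h3, h4⟩
              exact ⟨i, j, h1, h2, by omega, h4⟩
            · rintro ⟨i, j, h1, h2, h3, h4⟩
              refine ⟨i, j, h1, h2, ?_, h4⟩
              rcases Nat.lt_or_ge j hi with h | h
              · omega
              · have hjeq : j = hi := by omega
                subst hjeq
                have hige : vals.getD lo 0 ≤ vals.getD i 0 := pvMono hs h1 (by omega)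
                omega
  intro lo hi hhi
  exact main (hi - lo) lo hi rfl hhi

-- index-pair form ↔ distinct-value-pair form, for a strictly increasing list
theorem pvIdxVal (vals : List Int) (target : Int) (hlt : vals.Pairwise (· < ·)) :
    (∃ i j : Nat, 0 ≤ i ∧ i < j ∧ j ≤ vals.length - 1 ∧ vals.getD i 0 + vals.getD j 0 = target) ↔
    (∃ a ∈ vals, ∃ b ∈ vals, a ≠ b ∧ a + b = target) := by
  have hle : vals.Pairwise (· ≤ ·) := hlt.imp (fun h => le_of_lt h)
  constructor
  · rintro ⟨i, j, _, hij, hj1, hsum⟩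
    have hjlt : j < vals.length := by
      rcases Nat.eq_zero_or_pos vals.length with h0 | h0
      · omega
      · omega
    have hilt : i < vals.length := Nat.lt_trans hij hjlt
    have hab : vals.getD i 0 < vals.getD j 0 := by
      have := (List.pairwise_iff_getElem.mp hlt) i j hilt hjlt hij
      simpa [List.getD_eq_getElem, hilt, hjlt] using this
    refine ⟨vals.getD i 0, ?_, vals.getD j 0, ?_, by omega, hsum⟩
    · simp [hilt]
    · simp [hjlt]
  · rintro ⟨a, ha, b, hb, hne, hsum⟩
    -- order the two distinct values, then their indices follow the value order
    have key : ∀ u v : Int, u ∈ vals → v ∈ vals → u < v → u + v = target →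
        ∃ i j : Nat, 0 ≤ i ∧ i < j ∧ j ≤ vals.length - 1 ∧ vals.getD i 0 + vals.getD j 0 = target := by
      intro u v hu hv huv hsum2
      obtain ⟨i, hilt, hieq⟩ := List.getElem_of_mem hu
      obtain ⟨j, hjlt, hjeq⟩ := List.getElem_of_mem hv
      have hij : i < j := by
        rcases Nat.lt_trichotomy i j with h | h | h
        · exact h
        · subst h; rw [hieq] at hjeq; omega
        · have := (List.pairwise_iff_getElem.mp hlt) j i hjlt hilt h
          rw [hieq, hjeq] at this; omega
      refine ⟨i, j, Nat.zero_le _, hij, by omega, ?_⟩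
      rw [List.getD_eq_getElem _ _ hilt, List.getD_eq_getElem _ _ hjlt, hieq, hjeq]
      exact hsum2
    rcases lt_trichotomy a b with h | h | h
    · exact key a b ha hb h hsum
    · exact absurd h hne
    · exact key b a hb ha h (by omega)

-- A's inner existence test ↔ distinct-value-pair form
theorem pvAInner (s : List Int) (x : Int) :
    (s.any (fun number => decide (x - number ≠ number) && PySem.Set.contains s (x - number)) = true) ↔
    (∃ a ∈ s, ∃ b ∈ s, a ≠ b ∧ a + b = x) := by
  simp only [List.any_eq_true, Bool.and_eq_true, decide_eq_true_eq, PySem.Set.contains,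
    List.contains_iff_mem]
  constructor
  · rintro ⟨n, hn, hne, hm⟩
    exact ⟨n, hn, x - n, hm, fun h => hne (by omega), by omega⟩
  · rintro ⟨a, ha, b, hb, hne, hsum⟩
    refine ⟨a, ha, by omega, ?_⟩
    have : x - a = b := by omega
    rw [this]; exact hb

theorem pvStep (numbers : List Int) (preamble_size i : Int) :
    (let x := PySem.List.pyGetD numbers i 0
     let pset : PySem.Set Int := PySem.Set.ofList (PySem.List.slice numbers (some (i - preamble_size)) (some i))
     pset.any (fun number => decide (x - number ≠ number) && PySem.Set.contains pset (x - number)))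
    = (let x := PySem.List.pyGetD numbers i 0
       let vals := PySem.List.sorted (PySem.Set.ofList (PySem.List.slice numbers (some (i - preamble_size)) (some i))) (fun v => v) false
       pvTwoPtr vals x 0 (vals.length - 1)) := by
  simp only []
  set x := PySem.List.pyGetD numbers i 0 with hx
  set pset : PySem.Set Int := PySem.Set.ofList (PySem.List.slice numbers (some (i - preamble_size)) (some i)) with hpset
  set vals := PySem.List.sorted pset (fun v => v) false with hvals
  have hperm : ∀ y : Int, y ∈ vals ↔ y ∈ pset := fun y => PySem.List.mem_sorted _ _ _ _
  have hslt : vals.Pairwise (· < ·) := by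
    rw [hvals, hpset]; exact PySem.List.sorted_ofList_pairwise_lt _
  have hsle : vals.Pairwise (· ≤ ·) := hslt.imp (fun h => le_of_lt h)
  rw [Bool.eq_iff_iff]
  rcases List.eq_nil_or_concat vals with hnil | ⟨_, _, hcons⟩
  · -- empty window: both tests are false
    have hps : pset = [] := by
      have := (PySem.List.sorted_eq_nil_iff (xs := pset) (key := fun v => v) (rev := false))
      rw [← hvals] at this
      exact this.mp hnil
    rw [hps, hnil]
    simp [pvTwoPtr]
  · have hlen : 0 < vals.length := by
      rw [hcons]; simp
    rw [pvAInner, pvTwoPtr_iff vals x hsle 0 (vals.length - 1) (by omega), pvIdxVal vals x hslt]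
    constructor
    · rintro ⟨a, ha, b, hb, hne, hsum⟩
      exact ⟨a, (hperm a).mpr ha, b, (hperm b).mpr hb, hne, hsum⟩
    · rintro ⟨a, ha, b, hb, hne, hsum⟩
      exact ⟨a, (hperm a).mp ha, b, (hperm b).mp hb, hne, hsum⟩

theorem pvLoops (numbers : List Int) (preamble_size : Int) :
    ∀ l : List Int, pvALoop numbers preamble_size l = pvBLoop numbers preamble_size l := by
  intro l
  induction l with
  | nil => rfl
  | cons i rest ih =>
      have h := pvStep numbers preamble_size i
      simp only [pvALoop, pvBLoop] at *
      rw [h, ih]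

-- ===== VERDICT (by name: the statement is the Claim_ definition above) =====
theorem part_one_spec : Claim_equal_part_one := by
  intro numbers preamble_size _ _
  unfold Spec_part_one part_one part_one_alt
  exact pvLoops numbers preamble_size _
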